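-- pv_equiv track=rewrite | github.com/jjoshua2/arc_agi | dupes/31aa019c_group-055/test_correct/1282.py | transform
-- ===== SOURCE A (Python) =====
-- def transform(grid: list[list[int]]) -> list[list[int]]:
--     if not grid or not grid[0]:
--         return []
--
--     rows = len(grid)
--     cols = len(grid[0])
--
--     # Count frequency of each color
--     count = [0] * 10
--     for r in range(rows):
--         for c in range(cols):
--             color = grid[r][c]
--             if 1 <= color <= 9:  # Ignore 0
--                 count[color] += 1
--
--     # Find the color with exactly one occurrence
--     unique_color = None
--     for color in range(1, 10):
--         if count[color] == 1:
--             unique_color = color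
--             break
--
--     if unique_color is None:
--         # If no unique color, return all zeros? But assume there is one
--         return [[0 for _ in range(cols)] for _ in range(rows)]
--
--     # Find the position of the unique color
--     pos_r, pos_c = -1, -1
--     for r in range(rows):
--         for c in range(cols):
--             if grid[r][c] == unique_color:
--                 pos_r, pos_c = r, c
--                 break
--         if pos_r != -1:
--             break
--
--     # Create output grid all zeros
--     output = [[0 for _ in range(cols)] for _ in range(rows)]
--
--     # Fill the 3x3 centered at (pos_r, pos_c) with 2's, center with unique_color
--     for i in [-1, 0, 1]:
--         for j in [-1, 0, 1]:
--             nr = pos_r + i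
--             nc = pos_c + j
--             if 0 <= nr < rows and 0 <= nc < cols:
--                 if i == 0 and j == 0:
--                     output[nr][nc] = unique_color
--                 else:
--                     output[nr][nc] = 2
--
--     return output
-- ===== SOURCE B (Python) =====
-- def transform(grid: list[list[int]]) -> list[list[int]]:
--     if not grid or not grid[0]:
--         return []
--
--     rows = len(grid)
--     cols = len(grid[0])
--
--     # One pass: group the positions of every color 1..9
--     positions = {}
--     for r in range(rows):
--         for c in range(cols):
--             v = grid[r][c]
--             if 1 <= v <= 9:
--                 positions.setdefault(v, []).append((r, c))
--
--     out = [[0 for _ in range(cols)] for _ in range(rows)]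
--
--     # Lowest color that occurs exactly once; its position comes from the dict
--     for color in range(1, 10):
--         occ = positions.get(color, [])
--         if len(occ) == 1:
--             pr, pc = occ[0]
--             for nr in range(pr - 1, pr + 2):
--                 for nc in range(pc - 1, pc + 2):
--                     if 0 <= nr < rows and 0 <= nc < cols:
--                         out[nr][nc] = color if (nr, nc) == (pr, pc) else 2
--             break
--
--     return out
-- ===== Notes on version B (the rewrite author's own statement) =====
-- stated objective: simpler
-- what changed: A counts colors into a 10-slot array and then re-scans the whole grid with a sentinel/break loop to locate the unique color; B makes one pass that groups the (r,c) positions of every color 1..9 in a dict and reads the unique color's position straight from its singleton list, filling the 3x3 box by absolute coordinate ranges.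
import Mathlib
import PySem

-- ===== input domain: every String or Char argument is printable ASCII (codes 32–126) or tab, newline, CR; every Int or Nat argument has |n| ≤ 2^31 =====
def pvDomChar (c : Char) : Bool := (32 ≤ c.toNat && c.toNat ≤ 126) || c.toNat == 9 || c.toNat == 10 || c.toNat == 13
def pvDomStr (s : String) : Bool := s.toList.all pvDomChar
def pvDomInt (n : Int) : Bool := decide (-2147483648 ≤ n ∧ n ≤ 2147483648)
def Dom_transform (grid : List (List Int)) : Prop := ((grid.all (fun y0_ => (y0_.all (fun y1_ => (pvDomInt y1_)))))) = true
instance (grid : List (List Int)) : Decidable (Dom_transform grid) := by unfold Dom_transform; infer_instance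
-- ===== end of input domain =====

-- B replaces A's count array + second sentinel scan by one pass grouping the positions of every
-- color 1..9 in a dict, reading the unique color's position straight from its singleton group (simpler, one grid pass).

-- ===== PORT A =====
-- grid[r][c] (indices produced by range(), always in range under Pre_)
def pvCell (grid : List (List Int)) (r c : Int) : Int :=
  PySem.List.pyGetD (PySem.List.pyGetD grid r ([] : List Int)) c 0

-- out[nr][nc] = v  (both Pythons assign under the guard 0 ≤ nr < rows, 0 ≤ nc < cols)
def pvSetCell (g : List (List Int)) (r c v : Int) : List (List Int) :=
  g.modify r.toNat (fun row => row.set c.toNat v)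

-- [[0 for _ in range(cols)] for _ in range(rows)]  (built identically by A and B)
def pvZeros (rows cols : Int) : List (List Int) :=
  (PySem.List.pyRange 0 rows).map (fun _ => (PySem.List.pyRange 0 cols).map (fun _ => (0 : Int)))

-- A: count = [0]*10; nested loops do count[color] += 1 for colors 1..9
def pvCountA (grid : List (List Int)) (rows cols : Int) : List Int :=
  (PySem.List.pyRange 0 rows).foldl (fun cnt r =>
    (PySem.List.pyRange 0 cols).foldl (fun cnt c =>
      if 1 ≤ pvCell grid r c ∧ pvCell grid r c ≤ 9 then
        PySem.List.pySetD cnt (pvCell grid r c) (PySem.List.pyGetD cnt (pvCell grid r c) 0 + 1)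
      else cnt) cnt) (List.replicate 10 (0 : Int))

-- A: pos_r, pos_c = -1, -1; nested scan with break at the first cell equal to u
def pvScanA (grid : List (List Int)) (rows cols u : Int) : Int × Int :=
  (PySem.List.pyRange 0 rows).foldl (fun pos r =>
    if pos.1 ≠ -1 then pos
    else (PySem.List.pyRange 0 cols).foldl (fun pos c =>
      if pos.1 ≠ -1 then pos
      else if pvCell grid r c == u then (r, c) else pos) pos) (-1, -1)

-- A: for i in [-1,0,1]: for j in [-1,0,1]: bounds-checked write around pos
def pvFillA (rows cols u : Int) (pos : Int × Int) (out : List (List Int)) : List (List Int) :=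
  ([-1, 0, 1] : List Int).foldl (fun out i =>
    ([-1, 0, 1] : List Int).foldl (fun out j =>
      if 0 ≤ pos.1 + i ∧ pos.1 + i < rows ∧ 0 ≤ pos.2 + j ∧ pos.2 + j < cols then
        pvSetCell out (pos.1 + i) (pos.2 + j) (if i = 0 ∧ j = 0 then u else 2)
      else out) out) out

def transform (grid : List (List Int)) : List (List Int) :=
  if grid = [] ∨ grid.headD [] = [] then []
  else
    match (PySem.List.pyRange 1 10).find? (fun color =>
        PySem.List.pyGetD (pvCountA grid grid.length (grid.headD []).length) color 0 == 1) with
    | none => pvZeros grid.length (grid.headD []).length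
    | some u =>
        pvFillA grid.length (grid.headD []).length u
          (pvScanA grid grid.length (grid.headD []).length u)
          (pvZeros grid.length (grid.headD []).length)

-- ===== PORT B =====
-- B: one pass, positions.setdefault(v, []).append((r, c)) for colors 1..9
def pvGroupB (grid : List (List Int)) (rows cols : Int) : PySem.Dict Int (List (Int × Int)) :=
  (PySem.List.pyRange 0 rows).foldl (fun d r =>
    (PySem.List.pyRange 0 cols).foldl (fun d c =>
      if 1 ≤ pvCell grid r c ∧ pvCell grid r c ≤ 9 then
        d.modify (pvCell grid r c) [] (fun x => x ++ [(r, c)])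
      else d) d) PySem.Dict.empty

-- B: for nr in range(pr-1, pr+2): for nc in range(pc-1, pc+2): bounds-checked write
def pvFillB (rows cols color pr pc : Int) (out : List (List Int)) : List (List Int) :=
  (PySem.List.pyRange (pr - 1) (pr + 2)).foldl (fun out nr =>
    (PySem.List.pyRange (pc - 1) (pc + 2)).foldl (fun out nc =>
      if 0 ≤ nr ∧ nr < rows ∧ 0 ≤ nc ∧ nc < cols then
        pvSetCell out nr nc (if nr = pr ∧ nc = pc then color else 2)
      else out) out) out

def transform_alt (grid : List (List Int)) : List (List Int) :=
  if grid = [] ∨ grid.headD [] = [] then []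
  else
    match (PySem.List.pyRange 1 10).find? (fun color =>
        ((pvGroupB grid grid.length (grid.headD []).length).getD color []).length == 1) with
    | none => pvZeros grid.length (grid.headD []).length
    | some color =>
        match ((pvGroupB grid grid.length (grid.headD []).length).getD color []).headD (0, 0) with
        | (pr, pc) =>
            pvFillB grid.length (grid.headD []).length color pr pc
              (pvZeros grid.length (grid.headD []).length)

-- ===== PRECONDITION & SPEC =====
-- Pre_ excludes only ragged grids whose first row is longer than some later row: there
-- A (and B alike) raises IndexError reading grid[r][c] for c < len(grid[0]).
def Pre_transform (grid : List (List Int)) : Prop :=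
  grid = [] ∨ grid.headD [] = [] ∨ ∀ row ∈ grid, (grid.headD []).length ≤ row.length
instance (grid : List (List Int)) : Decidable (Pre_transform grid) := by unfold Pre_transform; infer_instance
def pvWitness_transform : List (List Int) := [[0, 3, 0], [3, 5, 0]]
def Spec_transform (grid : List (List Int)) (out : List (List Int)) : Prop := out = transform_alt grid
instance (grid : List (List Int)) (out : List (List Int)) : Decidable (Spec_transform grid out) := by unfold Spec_transform; infer_instance

-- ===== CLAIM (what is proved, stated in full; the proofs are below) =====
def Claim_equal_transform : Prop := ∀ (grid : List (List Int)), Dom_transform grid → Pre_transform grid → Spec_transform grid (transform grid)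

-- ===== LEMMAS AND PROOFS =====

-- the grid cells in A's and B's common row-major traversal order: (value, (r, c))
def pvPairs (grid : List (List Int)) (rows cols : Int) : List (Int × (Int × Int)) :=
  (PySem.List.pyRange 0 rows).flatMap (fun r =>
    (PySem.List.pyRange 0 cols).map (fun c => (pvCell grid r c, (r, c))))

theorem pvGetSet (xs : List Int) (a k v : Int) (ha1 : 0 ≤ a) (ha2 : a < (xs.length : Int)) (hk : 0 ≤ k) :
    PySem.List.pyGetD (PySem.List.pySetD xs a v) k 0 = if k = a then v else PySem.List.pyGetD xs k 0 := by
  obtain ⟨n, rfl⟩ : ∃ n : ℕ, a = (n : Int) := ⟨a.toNat, by omega⟩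
  obtain ⟨m, rfl⟩ : ∃ m : ℕ, k = (m : Int) := ⟨k.toNat, by omega⟩
  rw [PySem.List.pyGetD_pySetD_natCast xs n m v 0 (by exact_mod_cast ha2)]
  by_cases h : m = n
  · simp [h]
  · rw [if_neg h, if_neg (by exact_mod_cast h)]

theorem pvCount_spec (ps : List (Int × (Int × Int))) (cnt : List Int) (k : Int)
    (hlen : cnt.length = 10) (hk1 : 1 ≤ k) (hk9 : k ≤ 9) :
    PySem.List.pyGetD (ps.foldl (fun cnt p =>
        if 1 ≤ p.1 ∧ p.1 ≤ 9 then
          PySem.List.pySetD cnt p.1 (PySem.List.pyGetD cnt p.1 0 + 1)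
        else cnt) cnt) k 0
      = PySem.List.pyGetD cnt k 0 + (ps.countP (fun p => p.1 == k) : Int) := by
  induction ps generalizing cnt hlen with
  | nil => simp
  | cons q ps ih =>
    simp only [List.foldl_cons, List.countP_cons]
    by_cases hg : 1 ≤ q.1 ∧ q.1 ≤ 9
    · rw [if_pos hg, ih _ (by rw [PySem.List.length_pySetD]; exact hlen),
          pvGetSet cnt q.1 k _ (by omega) (by rw [hlen]; omega) (by omega)]
      by_cases he : k = q.1
      · subst he
        rw [if_pos rfl]
        simp only [beq_self_eq_true, if_true]
        push_cast
        ring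
      · rw [if_neg he]
        have hbe : (q.1 == k) = false := by simp; omega
        simp only [hbe]
        push_cast
        ring
    · rw [if_neg hg, ih _ hlen]
      have hbe : (q.1 == k) = false := by simp; omega
      simp only [hbe]
      push_cast
      ring

theorem pvCountA_spec (grid : List (List Int)) (rows cols k : Int) (hk1 : 1 ≤ k) (hk9 : k ≤ 9) :
    PySem.List.pyGetD (pvCountA grid rows cols) k 0
      = ((pvPairs grid rows cols).countP (fun p => p.1 == k) : Int) := by
  have hflat : pvCountA grid rows cols
      = (pvPairs grid rows cols).foldl (fun cnt p =>
          if 1 ≤ p.1 ∧ p.1 ≤ 9 then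
            PySem.List.pySetD cnt p.1 (PySem.List.pyGetD cnt p.1 0 + 1)
          else cnt) (List.replicate 10 (0 : Int)) := by
    simp only [pvCountA, pvPairs, List.foldl_flatMap, List.foldl_map]
  rw [hflat, pvCount_spec _ _ k (by simp) hk1 hk9]
  have hz : PySem.List.pyGetD (List.replicate 10 (0 : Int)) k 0 = 0 := by
    obtain ⟨m, rfl⟩ : ∃ m : ℕ, k = (m : Int) := ⟨k.toNat, by omega⟩
    have hm : m < 10 := by omega
    simp [PySem.List.pyGetD_natCast, List.getD_eq_getElem?_getD, hm]
    interval_cases m <;> rfl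
  rw [hz, zero_add]

theorem pvGroupB_spec (grid : List (List Int)) (rows cols k : Int) (hk1 : 1 ≤ k) (hk9 : k ≤ 9) :
    (pvGroupB grid rows cols).getD k []
      = ((pvPairs grid rows cols).filter (fun p => p.1 == k)).map (fun p => p.2) := by
  have hflat : pvGroupB grid rows cols
      = (pvPairs grid rows cols).foldl (fun d p =>
          if 1 ≤ p.1 ∧ p.1 ≤ 9 then d.modify p.1 [] (fun x => x ++ [p.2]) else d)
          PySem.Dict.empty := by
    simp only [pvGroupB, pvPairs, List.foldl_flatMap, List.foldl_map]
  rw [hflat, PySem.List.foldl_ite_eq_foldl_filter,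
      PySem.Dict.getD_foldl_modify_append, List.filter_filter]
  have hfe : ((pvPairs grid rows cols).filter
        (fun a => a.1 == k && decide (1 ≤ a.1 ∧ a.1 ≤ 9)))
      = (pvPairs grid rows cols).filter (fun p => p.1 == k) := by
    apply List.filter_congr
    intro p _
    by_cases h : p.1 = k
    · simp [h]; omega
    · simp [h]
  rw [hfe]
  simp

theorem pvFind?_congr {α : Type} (l : List α) (p q : α → Bool) (h : ∀ x ∈ l, p x = q x) :
    l.find? p = l.find? q := by
  induction l with
  | nil => rfl
  | cons x xs ih =>
    simp only [List.find?_cons]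
    rw [h x (by simp)]
    cases q x
    · exact ih (fun y hy => h y (by simp [hy]))
    · rfl

theorem pvScan_skip (u : Int) (ps : List (Int × (Int × Int))) (p : Int × Int) (h : p.1 ≠ -1) :
    ps.foldl (fun p q => if p.1 ≠ -1 then p else if q.1 == u then q.2 else p) p = p := by
  induction ps with
  | nil => rfl
  | cons q ps ih => simp only [List.foldl_cons, if_pos h]; exact ih

theorem pvScan_flat (u : Int) (ps : List (Int × (Int × Int))) (hps : ∀ q ∈ ps, q.2.1 ≠ -1) :
    ps.foldl (fun p q => if p.1 ≠ -1 then p else if q.1 == u then q.2 else p) ((-1 : Int), (-1 : Int))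
      = (match (ps.filter (fun q => q.1 == u)).head? with
         | none => ((-1 : Int), (-1 : Int))
         | some q => q.2) := by
  induction ps with
  | nil => rfl
  | cons q ps ih =>
    simp only [List.foldl_cons, List.filter_cons]
    by_cases hq : (q.1 == u) = true
    · have h1 : (if (-1 : Int) ≠ -1 then ((-1 : Int), (-1 : Int))
          else if (q.1 == u) = true then q.2 else ((-1 : Int), (-1 : Int))) = q.2 := by
        simp [hq]
      rw [h1, pvScan_skip u ps q.2 (hps q (by simp)), if_pos hq]
      simp
    · have h1 : (if (-1 : Int) ≠ -1 then ((-1 : Int), (-1 : Int))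
          else if (q.1 == u) = true then q.2 else ((-1 : Int), (-1 : Int))) = (-1, -1) := by
        simp [hq]
      rw [h1, if_neg hq]
      exact ih (fun r hr => hps r (by simp [hr]))

theorem pvSkip {α : Type} (g : Int × Int → α → Int × Int) (l : List α)
    (hg : ∀ p x, p.1 ≠ -1 → g p x = p) (p : Int × Int) (h : p.1 ≠ -1) : l.foldl g p = p := by
  induction l with
  | nil => rfl
  | cons x l ih => rw [List.foldl_cons, hg p x h]; exact ih

theorem pvScanA_spec (grid : List (List Int)) (rows cols u : Int) :
    pvScanA grid rows cols u
      = (match ((pvPairs grid rows cols).filter (fun q => q.1 == u)).head? with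
         | none => ((-1 : Int), (-1 : Int))
         | some q => q.2) := by
  have houter : pvScanA grid rows cols u
      = (PySem.List.pyRange 0 rows).foldl (fun pos r =>
          (PySem.List.pyRange 0 cols).foldl (fun pos c =>
            if pos.1 ≠ -1 then pos
            else if pvCell grid r c == u then (r, c) else pos) pos) (-1, -1) := by
    unfold pvScanA
    apply PySem.List.foldl_congr_mem
    intro acc r _
    by_cases h : acc.1 ≠ -1
    · rw [if_pos h, pvSkip _ _ (fun p x hp => by simp [hp]) acc h]
    · rw [if_neg h]
  have hflat : (pvPairs grid rows cols).foldl (fun p q =>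
        if p.1 ≠ -1 then p else if q.1 == u then q.2 else p) ((-1 : Int), (-1 : Int))
      = (PySem.List.pyRange 0 rows).foldl (fun pos r =>
          (PySem.List.pyRange 0 cols).foldl (fun pos c =>
            if pos.1 ≠ -1 then pos
            else if pvCell grid r c == u then (r, c) else pos) pos) (-1, -1) := by
    simp only [pvPairs, List.foldl_flatMap, List.foldl_map]
  rw [houter, ← hflat]
  apply pvScan_flat
  intro q hq
  simp only [pvPairs, List.mem_flatMap, List.mem_map] at hq
  obtain ⟨r, hr, c, _, rfl⟩ := hq
  have := PySem.List.mem_pyRange_one.mp hr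
  simp
  omega

theorem pvFill_eq (rows cols u pr pc : Int) (z : List (List Int)) :
    pvFillA rows cols u (pr, pc) z = pvFillB rows cols u pr pc z := by
  unfold pvFillA pvFillB
  have hr : PySem.List.pyRange (pr - 1) (pr + 2) = List.map (fun i => pr + i) [-1, 0, 1] := by
    rw [PySem.List.pyRange_one_cons (by omega), PySem.List.pyRange_one_cons (by omega),
        PySem.List.pyRange_one_cons (by omega), PySem.List.pyRange_one_eq_nil (by omega)]
    simp only [List.map, List.cons.injEq, and_true]
    refine ⟨by ring, by ring, by ring⟩
  have hc : PySem.List.pyRange (pc - 1) (pc + 2) = List.map (fun j => pc + j) [-1, 0, 1] := by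
    rw [PySem.List.pyRange_one_cons (by omega), PySem.List.pyRange_one_cons (by omega),
        PySem.List.pyRange_one_cons (by omega), PySem.List.pyRange_one_eq_nil (by omega)]
    simp only [List.map, List.cons.injEq, and_true]
    refine ⟨by ring, by ring, by ring⟩
  rw [hr, hc]
  simp only [List.foldl_map]
  apply PySem.List.foldl_congr_mem
  intro acc i _
  apply PySem.List.foldl_congr_mem
  intro acc2 j _
  have hcond : (pr + i = pr ∧ pc + j = pc) ↔ (i = 0 ∧ j = 0) := by omega
  simp only [hcond]

-- ===== VERDICT (by name: the statement is the Claim_ definition above) =====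
theorem transform_spec : Claim_equal_transform := by
  unfold Claim_equal_transform
  intro grid _ _
  unfold Spec_transform
  by_cases h0 : grid = [] ∨ grid.headD [] = []
  · rw [transform, transform_alt, if_pos h0, if_pos h0]
  · rw [transform, transform_alt, if_neg h0, if_neg h0]
    have hfind : (PySem.List.pyRange 1 10).find? (fun color =>
          PySem.List.pyGetD (pvCountA grid grid.length (grid.headD []).length) color 0 == 1)
        = (PySem.List.pyRange 1 10).find? (fun color =>
          ((pvGroupB grid grid.length (grid.headD []).length).getD color []).length == 1) := by
      apply pvFind?_congr
      intro k hk
      have hk19 := PySem.List.mem_pyRange_one.mp hk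
      rw [pvCountA_spec _ _ _ k hk19.1 (by omega),
          pvGroupB_spec _ _ _ k hk19.1 (by omega)]
      simp only [List.length_map, List.countP_eq_length_filter]
      rw [Bool.eq_iff_iff]
      simp only [beq_iff_eq]
      omega
    rw [hfind]
    cases hfu : (PySem.List.pyRange 1 10).find? (fun color =>
        ((pvGroupB grid grid.length (grid.headD []).length).getD color []).length == 1) with
    | none => rfl
    | some u =>
      have hu19 := PySem.List.mem_pyRange_one.mp (List.mem_of_find?_eq_some hfu)
      have hlen1 : ((pvGroupB grid grid.length (grid.headD []).length).getD u []).length = 1 := by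
        have := List.find?_some hfu
        simpa using this
      rw [pvGroupB_spec _ _ _ u hu19.1 (by omega), List.length_map] at hlen1
      obtain ⟨q, hq⟩ := List.length_eq_one_iff.mp hlen1
      obtain ⟨qv, qr, qc⟩ := q
      have hB : (((pvGroupB grid grid.length (grid.headD []).length).getD u []).headD (0, 0)) = (qr, qc) := by
        rw [pvGroupB_spec _ _ _ u hu19.1 (by omega), hq]
        simp
      have main : pvFillA (grid.length : Int) ((grid.headD []).length : Int) u
            (pvScanA grid grid.length (grid.headD []).length u)
            (pvZeros grid.length (grid.headD []).length)
          = pvFillB (grid.length : Int) ((grid.headD []).length : Int) u qr qc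
              (pvZeros grid.length (grid.headD []).length) := by
        rw [pvScanA_spec, hq]
        simp only [List.head?_cons]
        exact pvFill_eq _ _ u qr qc _
      show pvFillA (grid.length : Int) ((grid.headD []).length : Int) u
            (pvScanA grid grid.length (grid.headD []).length u)
            (pvZeros grid.length (grid.headD []).length)
          = pvFillB (grid.length : Int) ((grid.headD []).length : Int) u
              (((pvGroupB grid grid.length (grid.headD []).length).getD u []).headD (0, 0)).1
              (((pvGroupB grid grid.length (grid.headD []).length).getD u []).headD (0, 0)).2
              (pvZeros grid.length (grid.headD []).length)
      rw [hB]
      exact main
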